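-- pv_equiv track=rewrite | github.com/QOOlajide/python_challenges | round10.py | round_sum
-- ===== SOURCE A (Python) =====
-- def round_sum(a, b, c):
--     my_list = []
--     my_list.extend([a, b, c])
--     # for item in my_list:
--     #     new_num = str(item)[-1]
--     #     if new_num == "5":
--     #         item = math.floor(item/10) * 10
--     #     item = round(item, -1)
--     # return sum(my_list)
--     #Above doesn't actually chnage the values of the list. Item is just a COPY, not a reference!
--     #Solution: Use indexing to access values directly
--     # Check the rightmost digit of num
--     for i in range(len(my_list)):
--         remainder = my_list[i] % 10
--         if remainder >= 5:
--         # Round up to the next multiple of 10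
--             my_list[i] += (10 - remainder)
--         else:
--         # Round down to the previous multiple of 10
--             my_list[i] -= remainder
--
--     # Round each number and return the sum
--     return sum(my_list)
-- ===== SOURCE B (Python) =====
-- def round_sum(a, b, c):
--     # Find the floor multiple of ten by stepping down one unit at a time,
--     # then choose the nearer of the two surrounding multiples (ties go up).
--     def floor10(x):
--         while x % 10 != 0:
--             x -= 1
--         return x
--
--     def nearest10(x):
--         f = floor10(x)
--         return f + 10 if x - f >= 5 else f
--
--     return nearest10(a) + nearest10(b) + nearest10(c)
-- ===== Notes on version B (the rewrite author's own statement) =====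
-- stated objective: alternative
-- what changed: Replaces A's list-building, index loop and remainder-correction arithmetic with a per-argument search: step down one unit at a time to the floor multiple of ten, then pick the nearer of the two surrounding multiples (ties up), and sum the three results.
import Mathlib
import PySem

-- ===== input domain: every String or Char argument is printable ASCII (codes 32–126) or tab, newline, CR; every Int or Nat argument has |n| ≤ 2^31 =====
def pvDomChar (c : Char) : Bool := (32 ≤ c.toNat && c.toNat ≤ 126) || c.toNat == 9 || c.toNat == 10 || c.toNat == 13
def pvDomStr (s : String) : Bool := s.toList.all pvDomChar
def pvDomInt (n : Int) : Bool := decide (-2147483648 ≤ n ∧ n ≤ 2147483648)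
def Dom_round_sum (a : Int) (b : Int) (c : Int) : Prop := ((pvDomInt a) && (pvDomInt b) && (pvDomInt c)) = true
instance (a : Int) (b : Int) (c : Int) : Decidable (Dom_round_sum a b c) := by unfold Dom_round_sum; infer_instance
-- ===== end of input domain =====

-- B replaces A's list/index loop and remainder arithmetic by a unit-step search
-- down to the floor multiple of ten plus a nearer-multiple choice (ties up).

-- ===== PORT A =====
-- literal port of A: build the list, round each element in place by index, sum
def roundStepA (x : Int) : Int :=
  let remainder := PySem.Int.mod x 10
  if remainder ≥ 5 then x + (10 - remainder) else x - remainder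

def round_sum (a : Int) (b : Int) (c : Int) : Int :=
  let myList : List Int := []
  let myList := myList ++ [a, b, c]
  let myList := (List.range myList.length).foldl
    (fun l i => l.set i (roundStepA (l.getD i 0))) myList
  myList.sum

-- ===== PORT B =====
-- B's while loop: decrement x until it is a multiple of 10
def floor10 (x : Int) : Int :=
  if PySem.Int.mod x 10 ≠ 0 then floor10 (x - 1) else x
termination_by (PySem.Int.mod x 10).toNat
decreasing_by
  simp only [PySem.Int.mod_eq_emod_of_pos (show (0:Int) < 10 by norm_num)] at *
  omega

def nearest10 (x : Int) : Int :=
  let f := floor10 x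
  if x - f ≥ 5 then f + 10 else f

def round_sum_alt (a : Int) (b : Int) (c : Int) : Int :=
  nearest10 a + nearest10 b + nearest10 c

-- ===== PRECONDITION & SPEC =====
def Spec_round_sum (a : Int) (b : Int) (c : Int) (out : Int) : Prop := out = round_sum_alt a b c
instance (a : Int) (b : Int) (c : Int) (out : Int) : Decidable (Spec_round_sum a b c out) := by unfold Spec_round_sum; infer_instance

-- ===== CLAIM (what is proved, stated in full; the proofs are below) =====
def Claim_equal_round_sum : Prop := ∀ (a : Int) (b : Int) (c : Int), Dom_round_sum a b c → Spec_round_sum a b c (round_sum a b c)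

-- ===== LEMMAS AND PROOFS =====
lemma floor10_eq (x : Int) : floor10 x = x - x % 10 := by
  fun_induction floor10 x with
  | case1 x h ih =>
    rw [ih]
    rw [PySem.Int.mod_eq_emod_of_pos (show (0:Int) < 10 by norm_num)] at h
    have h2 : (x - 1) % 10 = (x % 10 - 1) % 10 := by
      conv_lhs => rw [Int.sub_emod]
      norm_num
    omega
  | case2 x h =>
    rw [PySem.Int.mod_eq_emod_of_pos (show (0:Int) < 10 by norm_num)] at h
    omega

lemma nearest10_eq_step (x : Int) : nearest10 x = roundStepA x := by
  simp only [nearest10, roundStepA, floor10_eq,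
    PySem.Int.mod_eq_emod_of_pos (show (0:Int) < 10 by norm_num)]
  have h1 := Int.emod_nonneg x (by norm_num : (10:Int) ≠ 0)
  have h2 := Int.emod_lt_of_pos x (by norm_num : (0:Int) < 10)
  split_ifs with h3 h4 <;> omega

-- ===== VERDICT (by name: the statement is the Claim_ definition above) =====
theorem round_sum_spec : Claim_equal_round_sum := by
  intro a b c _
  unfold Spec_round_sum round_sum round_sum_alt
  simp [List.range_succ, List.foldl, List.set, nearest10_eq_step]
  ring
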